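-- pv_equiv track=rewrite | github.com/feimvnc/pyclopedia | python_leetcode_questions/82_last_index_1.py | index_of_last_one_xor
-- ===== SOURCE A (Python) =====
-- def index_of_last_one_xor(s: str) -> int:
--     if not s:
--         return False
--
--     N = len(s) - 1
--     n = N
--     while n >=0:
--         if (ord(s[n]) ^ ord('0')):   # ord convert str to int, ord('1') ^ ord('0') -> 1
--             return n
--         n -= 1
-- ===== SOURCE B (Python) =====
-- def index_of_last_one_xor(s: str) -> int:
--     if not s:
--         return False
--     result = None
--     for i, ch in enumerate(s):
--         if ord(ch) ^ ord('0'):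
--             result = i
--     return result
-- ===== Notes on version B (the rewrite author's own statement) =====
-- stated objective: alternative
-- what changed: Replaces A's backward early-exit while-loop with a single forward enumerate scan keeping the latest non-'0' index in an accumulator.
-- outside the precondition, e.g. on index_of_last_one_xor(''): A returns False, B returns False; on index_of_last_one_xor('000'): A returns None, B returns None; on index_of_last_one_xor('0'): A returns None, B returns None
import Mathlib
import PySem

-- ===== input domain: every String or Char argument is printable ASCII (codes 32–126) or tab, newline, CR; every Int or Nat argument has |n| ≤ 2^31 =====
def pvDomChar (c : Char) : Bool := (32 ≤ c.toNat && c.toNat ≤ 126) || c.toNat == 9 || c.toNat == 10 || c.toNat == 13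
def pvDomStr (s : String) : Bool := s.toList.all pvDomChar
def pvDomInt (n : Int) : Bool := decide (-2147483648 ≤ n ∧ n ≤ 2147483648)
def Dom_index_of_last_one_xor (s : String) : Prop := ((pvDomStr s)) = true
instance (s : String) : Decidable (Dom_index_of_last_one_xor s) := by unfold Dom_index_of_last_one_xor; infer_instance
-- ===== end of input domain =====

-- B replaces A's backward early-exit while-loop by a single forward enumerate scan with a
-- last-seen accumulator (alternative decomposition, same O(n)); return-value equivalence only.

-- ===== PORT A =====
-- the 'while n >= 0: … n -= 1' loop, indexing from n = len(s)-1 downwards; argument is n+1,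
-- so index n is in range whenever the list is long enough (A only calls it with len(s)).
-- Falling out of the loop (all '0') is Python 'return None', outside Pre_; encoded -1.
def pvALoop (cs : List Char) : Nat → Int
  | 0 => -1
  | n + 1 => if ((cs.getD n ' ').toNat ^^^ 48) ≠ 0 then (n : Int) else pvALoop cs n

def index_of_last_one_xor (s : String) : Int :=
  if s.toList = [] then 0   -- Python 'return False', outside Pre_; encoded 0
  else pvALoop s.toList (s.toList.length)

-- ===== PORT B =====
-- forward scan: result = None; for i, ch in enumerate(s): if ord(ch)^ord('0'): result = i
def pvBStep (acc : Option Int) (p : Int × Char) : Option Int :=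
  if (p.2.toNat ^^^ 48) ≠ 0 then some p.1 else acc

def index_of_last_one_xor_alt (s : String) : Int :=
  if s.toList = [] then 0   -- Python 'return False', outside Pre_; encoded 0
  else
    match (PySem.List.enumerate s.toList 0).foldl pvBStep none with
    | some i => i
    | none => -1            -- Python 'return None', outside Pre_; encoded -1

-- ===== PRECONDITION & SPEC =====
-- Pre_ excludes the inputs on which A returns no int: the empty string (A returns False)
-- and all-'0' strings (A falls off the loop and returns None); B does the same there.
def Pre_index_of_last_one_xor (s : String) : Prop := (s.toList.any (fun c => c != '0')) = true
instance (s : String) : Decidable (Pre_index_of_last_one_xor s) := by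
  unfold Pre_index_of_last_one_xor; infer_instance

def pvWitness_index_of_last_one_xor : String := "1"

def Spec_index_of_last_one_xor (s : String) (out : Int) : Prop := out = index_of_last_one_xor_alt s
instance (s : String) (out : Int) : Decidable (Spec_index_of_last_one_xor s out) := by
  unfold Spec_index_of_last_one_xor; infer_instance

-- ===== CLAIM (what is proved, stated in full; the proofs are below) =====
def Claim_equal_index_of_last_one_xor : Prop := ∀ (s : String), Dom_index_of_last_one_xor s → Pre_index_of_last_one_xor s → Spec_index_of_last_one_xor s (index_of_last_one_xor s)

-- ===== LEMMAS AND PROOFS =====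

def pvOut (o : Option Int) : Int := match o with | some i => i | none => -1

lemma pvALoop_eq_fold (cs : List Char) (n : Nat) (hn : n ≤ cs.length) :
    pvALoop cs n = pvOut ((PySem.List.enumerate (cs.take n) 0).foldl pvBStep none) := by
  induction n with
  | zero => simp [pvALoop, pvOut]
  | succ n ih =>
    have hlt : n < cs.length := hn
    have htake : cs.take (n + 1) = cs.take n ++ [cs[n]] := by
      rw [List.take_add_one]
      simp [List.getElem?_eq_getElem hlt]
    have hlen : (cs.take n).length = n := List.length_take_of_le (Nat.le_of_lt hlt)
    rw [htake, PySem.List.enumerate_append, List.foldl_append]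
    simp only [PySem.List.enumerate_cons, PySem.List.enumerate_nil, hlen,
      List.foldl_cons, List.foldl_nil]
    have hget : cs.getD n ' ' = cs[n] := List.getD_eq_getElem cs ' ' hlt
    rw [pvALoop, hget]
    simp only [pvBStep]
    by_cases hc : ((cs[n]).toNat ^^^ 48) ≠ 0
    · rw [if_pos hc, if_pos hc]
      simp [pvOut]
    · rw [if_neg hc, if_neg hc]
      simpa using ih (Nat.le_of_lt hlt)

-- ===== VERDICT (by name: the statement is the Claim_ definition above) =====
theorem index_of_last_one_xor_spec : Claim_equal_index_of_last_one_xor := by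
  intro s _ _
  unfold Spec_index_of_last_one_xor index_of_last_one_xor index_of_last_one_xor_alt
  by_cases h : s.toList = []
  · simp [h]
  · simp only [h, ite_false]
    have := pvALoop_eq_fold s.toList s.toList.length (le_refl _)
    rw [List.take_length] at this
    rw [this]
    cases hfold : (PySem.List.enumerate s.toList 0).foldl pvBStep none <;> simp [pvOut]
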